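-- pv_equiv track=rewrite | github.com/MNafekh/Daily9er | marketAPI.py | findBuy
-- ===== SOURCE A (Python) =====
-- def findBuy(last13) -> int:
--     seq = 0
--     i = 0
--     while i < len(last13) - 4:
--         curr = last13[i]
--         fth = last13[i + 4]
--         if curr < fth:
--             seq += 1
--         else:
--             seq = 0
--         i += 1
--     return seq
-- ===== SOURCE B (Python) =====
-- def findBuy(last13) -> int:
--     # table of comparisons, then length of trailing run of True
--     cond = [a < b for a, b in zip(last13, last13[4:])]
--     seq = 0
--     for c in reversed(cond):
--         if not c:
--             break
--         seq += 1
--     return seq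
-- ===== Notes on version B (the rewrite author's own statement) =====
-- stated objective: alternative
-- what changed: replaces the forward reset-counter while-loop with a two-phase decomposition: build the comparison table via zip, then count its trailing run of True by scanning from the end
import Mathlib
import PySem

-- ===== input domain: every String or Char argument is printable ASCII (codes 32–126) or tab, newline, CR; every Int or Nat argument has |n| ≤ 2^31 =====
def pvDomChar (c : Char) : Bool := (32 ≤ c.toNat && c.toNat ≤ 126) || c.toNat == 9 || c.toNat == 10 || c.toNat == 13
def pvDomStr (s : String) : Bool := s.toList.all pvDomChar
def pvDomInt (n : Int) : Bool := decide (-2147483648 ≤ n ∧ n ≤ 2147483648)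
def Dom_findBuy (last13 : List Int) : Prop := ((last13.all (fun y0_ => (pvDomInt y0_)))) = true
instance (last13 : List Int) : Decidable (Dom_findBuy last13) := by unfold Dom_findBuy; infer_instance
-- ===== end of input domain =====

-- B replaces A's forward reset-counter loop by a comparison table plus a trailing-run count; same cost, alternative decomposition.
-- ===== PORT A =====
-- while i < len-4 with the reset-counter accumulator, as a fold over the index range
def findBuy (last13 : List Int) : Int :=
  (List.range (last13.length - 4)).foldl
    (fun seq i => if last13.getD i 0 < last13.getD (i + 4) 0 then seq + 1 else 0) 0

-- ===== PORT B =====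
-- count of the leading run of true (B scans reversed(cond) and breaks at the first False)
def pvRunCount : List Bool → Int
  | [] => 0
  | c :: rest => if c then pvRunCount rest + 1 else 0

def findBuy_alt (last13 : List Int) : Int :=
  let cond := (last13.zip (last13.drop 4)).map (fun p => decide (p.1 < p.2))
  pvRunCount cond.reverse

-- ===== PRECONDITION & SPEC =====
def Spec_findBuy (last13 : List Int) (out : Int) : Prop := out = findBuy_alt last13
instance (last13 : List Int) (out : Int) : Decidable (Spec_findBuy last13 out) := by unfold Spec_findBuy; infer_instance

-- ===== CLAIM (what is proved, stated in full; the proofs are below) =====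
def Claim_equal_findBuy : Prop := ∀ (last13 : List Int), Dom_findBuy last13 → Spec_findBuy last13 (findBuy last13)

-- ===== LEMMAS AND PROOFS =====

-- ===== VERDICT (by name: the statement is the Claim_ definition above) =====
-- the reset-counter fold equals the trailing-run count of the boolean list
theorem foldl_reset_eq_runCount (l : List Bool) :
    l.foldl (fun (s : Int) c => if c then s + 1 else 0) 0 = pvRunCount l.reverse := by
  induction l using List.reverseRecOn with
  | nil => rfl
  | append_singleton l c ih =>
    simp [List.foldl_append, pvRunCount, ih]

-- A's indexed comparisons are exactly B's zip table
theorem range_map_eq_cond (l : List Int) :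
    (List.range (l.length - 4)).map
        (fun i => decide (l.getD i 0 < l.getD (i + 4) 0))
      = (l.zip (l.drop 4)).map (fun p => decide (p.1 < p.2)) := by
  apply List.ext_getElem
  · simp
  · intro i h1 h2
    have hi : i < l.length - 4 := by simpa using h1
    have hil : i < l.length := by omega
    have hi4 : i + 4 < l.length := by omega
    simp [List.getD, hil, hi4, Nat.add_comm]

theorem findBuy_spec : Claim_equal_findBuy := by
  intro last13 _
  unfold Spec_findBuy findBuy findBuy_alt
  have h := range_map_eq_cond last13
  calc (List.range (last13.length - 4)).foldl
        (fun seq i => if last13.getD i 0 < last13.getD (i + 4) 0 then seq + 1 else 0) 0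
      = ((List.range (last13.length - 4)).map
          (fun i => decide (last13.getD i 0 < last13.getD (i + 4) 0))).foldl
          (fun (s : Int) c => if c then s + 1 else 0) 0 := by
        rw [List.foldl_map]; simp
    _ = ((last13.zip (last13.drop 4)).map (fun p => decide (p.1 < p.2))).foldl
          (fun (s : Int) c => if c then s + 1 else 0) 0 := by rw [h]
    _ = pvRunCount ((last13.zip (last13.drop 4)).map (fun p => decide (p.1 < p.2))).reverse :=
        foldl_reset_eq_runCount _
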